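-- pv_equiv track=rewrite | github.com/SobelemaA/bagels | bagels.py | getClues
-- ===== SOURCE A (Python) =====
-- def getClues(guess, secret_number):
--     """Return a string with the pico, fermi, bagels clue for a guess and secret number pair"""
--     if guess == secret_number:
--         return 'You got it!'
--
--     clues = []
--     # Need to check correctness and positions of guess to secret number
--     for i in range(len(guess)):
--         if guess[i] == secret_number[i]:
--             # Correct Digit in the right place
--             clues.append('Fermi')
--         elif guess[i] in secret_number:
--             # Correct Digit in the wrong place
--             clues.append('Pico')
--
--     if len(clues) == 0:
--         # No Correct digits
--         return 'Bagels'
--     else: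
--         # Sort clues into alphabetical order so original order doesn't give information away
--         # User doesn't know which is correct or incorrect and return single string
--         clues.sort()
--         return ''.join(clues)
-- ===== SOURCE B (Python) =====
-- def getClues(guess, secret_number):
--     """Return a string with the pico, fermi, bagels clue for a guess and secret number pair"""
--     if guess == secret_number:
--         return 'You got it!'
--     # a positional match is always a membership hit, so pico = hits - fermi
--     fermi = sum(secret_number[i] == c for i, c in enumerate(guess))
--     hits = sum(c in secret_number for c in guess)
--     if hits == 0:
--         return 'Bagels'
--     return 'Fermi' * fermi + 'Pico' * (hits - fermi)
-- ===== Notes on version B (the rewrite author's own statement) =====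
-- stated objective: alternative
-- what changed: B replaces A's single branching loop that builds, sorts and joins a clue list by two independent branch-free counting passes (exact positional matches, then membership hits over the whole guess) and derives pico = hits - fermi from the identity that a positional match is always a membership hit, emitting 'Fermi'*fermi + 'Pico'*pico.
import Mathlib
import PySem

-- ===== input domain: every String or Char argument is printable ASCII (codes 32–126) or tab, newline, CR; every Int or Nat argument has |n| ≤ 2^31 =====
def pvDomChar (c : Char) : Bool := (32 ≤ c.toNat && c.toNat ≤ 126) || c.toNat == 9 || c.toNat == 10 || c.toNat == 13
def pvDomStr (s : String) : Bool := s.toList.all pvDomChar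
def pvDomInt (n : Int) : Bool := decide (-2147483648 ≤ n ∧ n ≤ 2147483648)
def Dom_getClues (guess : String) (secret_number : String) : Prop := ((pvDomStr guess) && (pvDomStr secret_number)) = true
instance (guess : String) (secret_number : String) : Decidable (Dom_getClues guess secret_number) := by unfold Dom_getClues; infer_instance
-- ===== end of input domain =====

-- B replaces A's branching build-sort-join loop by two branch-free counting passes and pico = hits - fermi (objective: alternative).

-- ===== PORT A =====
def getClues (guess : String) (secret_number : String) : String :=
  if guess.toList = secret_number.toList then "You got it!" else
  let gl := guess.toList
  let sl := secret_number.toList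
  -- for i in range(len(guess)): build the clues list
  let clues : List String := (List.range gl.length).foldl (fun acc i =>
      match sl[i]? with
      | none => acc  -- here Python raises IndexError on secret_number[i]; excluded by Pre_
      | some s =>
        if gl.getD i ' ' = s then acc ++ ["Fermi"]   -- i < len(guess), so getD is exactly guess[i]
        else if gl.getD i ' ' ∈ sl then acc ++ ["Pico"]  -- 1-char 'in' on str = char membership (exact)
        else acc) []
  if clues.length = 0 then "Bagels"
  else PySem.Str.join "" (PySem.List.sorted clues (fun x => x) false)

-- ===== PORT B =====
def getClues_alt (guess : String) (secret_number : String) : String :=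
  if guess.toList = secret_number.toList then "You got it!" else
  let gl := guess.toList
  let sl := secret_number.toList
  -- fermi = sum(secret_number[i] == c for i, c in enumerate(guess))
  let fermi : Int := (PySem.List.enumerate gl).foldl (fun a p =>
      match PySem.List.pyGet? sl p.1 with
      | none => a  -- here Python raises IndexError on secret_number[i]; excluded by Pre_
      | some s => a + (if s = p.2 then 1 else 0)) 0
  -- hits = sum(c in secret_number for c in guess)
  let hits : Int := gl.foldl (fun a c => a + (if c ∈ sl then 1 else 0)) 0
  if hits = 0 then "Bagels"
  else String.ofList ((List.replicate fermi.toNat "Fermi".toList).flatten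
                      ++ (List.replicate (hits - fermi).toNat "Pico".toList).flatten)

-- ===== PRECONDITION & SPEC =====
-- Pre_ excludes exactly the inputs where A raises IndexError: guess strictly longer than
-- secret_number (and not equal to it), so that secret_number[i] goes out of range.
def Pre_getClues (guess : String) (secret_number : String) : Prop :=
  guess = secret_number ∨ guess.toList.length ≤ secret_number.toList.length
instance (guess : String) (secret_number : String) : Decidable (Pre_getClues guess secret_number) := by unfold Pre_getClues; infer_instance
def pvWitness_getClues : String × String := ("12", "13")

def Spec_getClues (guess : String) (secret_number : String) (out : String) : Prop := out = getClues_alt guess secret_number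
instance (guess : String) (secret_number : String) (out : String) : Decidable (Spec_getClues guess secret_number out) := by unfold Spec_getClues; infer_instance

-- ===== CLAIM =====
def Claim_equal_getClues : Prop := ∀ (guess : String) (secret_number : String), Dom_getClues guess secret_number → Pre_getClues guess secret_number → Spec_getClues guess secret_number (getClues guess secret_number)

-- ===== LEMMAS AND PROOFS =====

-- the clue (if any) produced by one position of the zipped pair, membership taken in `full`
def pvTag (full : List Char) (p : Char × Char) : Option String :=
  if p.1 = p.2 then some "Fermi" else if p.1 ∈ full then some "Pico" else none

-- A's index loop over range(len(guess)) produces exactly the clues of the zipped list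
theorem pvLoopA (gl : List Char) : ∀ (sl full : List Char) (acc : List String),
    gl.length ≤ sl.length →
    (List.range gl.length).foldl (fun acc i =>
      match sl[i]? with
      | none => acc
      | some s =>
        if gl.getD i ' ' = s then acc ++ ["Fermi"]
        else if gl.getD i ' ' ∈ full then acc ++ ["Pico"]
        else acc) acc
    = acc ++ (gl.zip sl).filterMap (pvTag full) := by
  induction gl with
  | nil => intro sl full acc h; simp
  | cons c gl ih =>
    intro sl full acc h
    cases sl with
    | nil => simp at h
    | cons s sl =>
      simp only [List.length_cons, List.range_succ_eq_map, List.foldl_cons, List.foldl_map,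
        List.getElem?_cons_zero, List.getD_cons_zero, List.getElem?_cons_succ, List.getD_cons_succ,
        List.zip_cons_cons, List.filterMap_cons]
      have h' : gl.length ≤ sl.length := by simpa using h
      by_cases h1 : c = s
      · have ht : pvTag full (c, s) = some "Fermi" := by simp [pvTag, h1]
        rw [ht, if_pos h1, ih sl full _ h']; simp
      · rw [if_neg h1]
        by_cases h2 : c ∈ full
        · have ht : pvTag full (c, s) = some "Pico" := by simp [pvTag, h1, h2]
          rw [ht, if_pos h2, ih sl full _ h']; simp
        · have ht : pvTag full (c, s) = none := by simp [pvTag, h1, h2]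
          rw [ht, if_neg h2, ih sl full _ h']

-- B's first pass counts the "Fermi" clues of the zipped list
theorem pvLoopFermi (gl : List Char) : ∀ (sl full : List Char) (k : Nat) (a : Int),
    gl.length + k ≤ sl.length →
    (PySem.List.enumerate gl (k : Int)).foldl (fun a p =>
      match PySem.List.pyGet? sl p.1 with
      | none => a
      | some s => a + (if s = p.2 then 1 else 0)) a
    = a + (((gl.zip (sl.drop k)).filterMap (pvTag full)).count "Fermi" : Int) := by
  induction gl with
  | nil => intro sl full k a h; simp [PySem.List.enumerate_nil]
  | cons c gl ih =>
    intro sl full k a h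
    have hk : k < sl.length := by simp at h; omega
    have hget : PySem.List.pyGet? sl (k : Int) = some sl[k] := by
      simp [PySem.List.pyGet?_natCast, List.getElem?_eq_getElem hk]
    have hdrop : sl.drop k = sl[k] :: sl.drop (k + 1) := by
      rw [List.drop_eq_getElem_cons hk]
    rw [PySem.List.enumerate_cons, List.foldl_cons]
    simp only [hget]
    have : ((k : Int) + 1) = ((k + 1 : Nat) : Int) := by push_cast; ring
    rw [this, ih sl full (k + 1) _ (by simp at h ⊢; omega)]
    rw [hdrop, List.zip_cons_cons, List.filterMap_cons]
    by_cases h1 : c = sl[k]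
    · have ht : pvTag full (c, sl[k]) = some "Fermi" := by simp [pvTag, h1]
      rw [ht, if_pos h1.symm]
      have e1 : (("Fermi" : String) == "Fermi") = true := by decide
      simp only [List.count_cons, e1, if_true]
      push_cast; ring
    · have h1' : ¬ sl[k] = c := fun e => h1 e.symm
      rw [if_neg h1']
      by_cases h2 : c ∈ full
      · have ht : pvTag full (c, sl[k]) = some "Pico" := by simp [pvTag, h1, h2]
        rw [ht]
        have e2 : (("Pico" : String) == "Fermi") = false := by decide
        simp only [List.count_cons, e2, Bool.false_eq_true, if_false]
        push_cast; ring
      · have ht : pvTag full (c, sl[k]) = none := by simp [pvTag, h1, h2]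
        rw [ht]; ring

-- B's second pass counts ALL clues of the zipped list: a positional match is a membership hit
theorem pvLoopHits (l : List (Char × Char)) : ∀ (full : List Char) (a : Int),
    (∀ p ∈ l, p.2 ∈ full) →
    (l.map Prod.fst).foldl (fun a c => a + (if c ∈ full then 1 else 0)) a
    = a + (((l.filterMap (pvTag full)).count "Fermi" : Int))
        + (((l.filterMap (pvTag full)).count "Pico" : Int)) := by
  induction l with
  | nil => intro full a _; simp
  | cons p l ih =>
    intro full a h
    have hp2 : p.2 ∈ full := h p (List.mem_cons_self ..)
    have h' : ∀ q ∈ l, q.2 ∈ full := fun q hq => h q (List.mem_cons_of_mem _ hq)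
    simp only [List.map_cons, List.foldl_cons, List.filterMap_cons]
    by_cases h1 : p.1 = p.2
    · have ht : pvTag full p = some "Fermi" := by simp [pvTag, h1]
      rw [ht, if_pos (h1 ▸ hp2), ih full _ h']
      have e1 : (("Fermi" : String) == "Fermi") = true := by decide
      have e2 : (("Fermi" : String) == "Pico") = false := by decide
      simp only [List.count_cons, e1, e2, if_true, Bool.false_eq_true, if_false]
      push_cast; ring
    · have h1' : pvTag full p = if p.1 ∈ full then some "Pico" else none := by simp [pvTag, h1]
      by_cases h2 : p.1 ∈ full
      · rw [h1', if_pos h2, if_pos h2, ih full _ h']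
        have e3 : (("Pico" : String) == "Fermi") = false := by decide
        have e4 : (("Pico" : String) == "Pico") = true := by decide
        simp only [List.count_cons, e3, e4, if_true, Bool.false_eq_true, if_false]
        push_cast; ring
      · rw [h1', if_neg h2, if_neg h2, ih full _ h']; simp

-- every produced clue is "Fermi" or "Pico"
theorem pvTagMem {full : List Char} {l : List (Char × Char)} {x : String}
    (hx : x ∈ l.filterMap (pvTag full)) : x = "Fermi" ∨ x = "Pico" := by
  rcases List.mem_filterMap.1 hx with ⟨p, _, hp⟩
  unfold pvTag at hp
  split_ifs at hp <;> simp_all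

-- a list of "Fermi"/"Pico" strings is a permutation of its counted canonical form
theorem pvPermRep (ls : List String) (h : ∀ x ∈ ls, x = "Fermi" ∨ x = "Pico") :
    ls.Perm (List.replicate (ls.count "Fermi") "Fermi" ++ List.replicate (ls.count "Pico") "Pico") := by
  induction ls with
  | nil => simp
  | cons x ls ih =>
    have hx := h x (List.mem_cons_self ..)
    have h' : ∀ y ∈ ls, y = "Fermi" ∨ y = "Pico" := fun y hy => h y (List.mem_cons_of_mem _ hy)
    rcases hx with hx | hx
    · subst hx
      simp only [List.count_cons_self, List.replicate_succ]
      exact (ih h').cons _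
    · subst hx
      simp only [List.count_cons_self, List.replicate_succ]
      exact ((ih h').cons _).trans List.perm_middle.symm

theorem pvFermiLePico : ("Fermi" : String) ≤ "Pico" := by
  apply le_of_lt; rw [String.lt_iff_toList_lt]; decide

-- the canonical form is sorted
theorem pvPairwiseRep (f p : Nat) :
    (List.replicate f ("Fermi" : String) ++ List.replicate p "Pico").Pairwise (fun a b => a ≤ b) := by
  apply List.pairwise_append.2
  refine ⟨?_, ?_, ?_⟩
  · exact List.pairwise_replicate.2 (Or.inr le_rfl)
  · exact List.pairwise_replicate.2 (Or.inr le_rfl)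
  · intro a ha b hb
    rw [List.eq_of_mem_replicate ha, List.eq_of_mem_replicate hb]
    exact pvFermiLePico

theorem pvLoopFermi0 (gl sl full : List Char) (h : gl.length ≤ sl.length) :
    (PySem.List.enumerate gl).foldl (fun a p =>
      match PySem.List.pyGet? sl p.1 with
      | none => a
      | some s => a + (if s = p.2 then 1 else 0)) (0 : Int)
    = (((gl.zip sl).filterMap (pvTag full)).count "Fermi" : Int) := by
  have h0 : ((0 : Nat) : Int) = (0 : Int) := rfl
  have := pvLoopFermi gl sl full 0 0 (by omega)
  rw [h0] at this
  simpa using this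

-- ''.join on the character level
theorem pvFlattenIntersperse {α : Type} (ls : List (List α)) :
    (List.intersperse [] ls).flatten = ls.flatten := by
  induction ls with
  | nil => rfl
  | cons a ls ih =>
    cases ls with
    | nil => rfl
    | cons b ls => simpa [List.intersperse] using ih

theorem pvJoinEmpty (parts : List String) :
    (PySem.Str.join "" parts).toList = (parts.map String.toList).flatten := by
  simp [PySem.Str.join, PySem.Chars.join, List.intercalate, pvFlattenIntersperse]

-- ===== VERDICT =====
theorem getClues_spec : Claim_equal_getClues := by
  intro guess secret_number _ hpre
  unfold Spec_getClues getClues getClues_alt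
  by_cases heq : guess.toList = secret_number.toList
  · simp [heq]
  · simp only [if_neg heq]
    have hlen : guess.toList.length ≤ secret_number.toList.length := by
      rcases hpre with h | h
      · exact absurd (congrArg String.toList h) heq
      · exact h
    set gl := guess.toList
    set sl := secret_number.toList
    rw [pvLoopA gl sl sl [] hlen, pvLoopFermi0 gl sl sl hlen]
    have hhits := pvLoopHits (gl.zip sl) sl 0 (fun p hp => (List.of_mem_zip hp).2)
    rw [List.map_fst_zip hlen] at hhits
    rw [hhits]
    set cl := (gl.zip sl).filterMap (pvTag sl) with hcl
    have hmem : ∀ x ∈ cl, x = "Fermi" ∨ x = "Pico" := fun x hx => pvTagMem hx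
    have hperm := pvPermRep cl hmem
    have hlencl : cl.length = cl.count "Fermi" + cl.count "Pico" := by
      simpa using hperm.length_eq
    simp only [List.nil_append, zero_add]
    by_cases hz : cl.length = 0
    · have hF : cl.count "Fermi" = 0 := by omega
      have hP : cl.count "Pico" = 0 := by omega
      simp [hz, hF, hP]
    · have hnz : ¬ ((cl.count "Fermi" : Int) + (cl.count "Pico" : Int) = 0) := by omega
      simp only [if_neg hz, if_neg hnz]
      have hsorted : PySem.List.sorted cl (fun x => x) false
          = List.replicate (cl.count "Fermi") "Fermi" ++ List.replicate (cl.count "Pico") "Pico" :=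
        PySem.List.sorted_id_eq_of_perm_of_pairwise _ _ hperm.symm (pvPairwiseRep _ _)
      rw [hsorted]
      apply String.toList_injective
      rw [pvJoinEmpty]
      have hF : ((cl.count "Fermi" : Int)).toNat = cl.count "Fermi" := by omega
      have hP : ((cl.count "Fermi" : Int) + (cl.count "Pico" : Int) - (cl.count "Fermi" : Int)).toNat
          = cl.count "Pico" := by omega
      rw [hF, hP]
      simp
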